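-- pv_equiv track=rewrite | github.com/farazraj/AI-Learnings | info_prac/info_prac.py | equiliser
-- ===== SOURCE A (Python) =====
-- def equiliser(s,n,t,m):
--     count = 0
--     slist = list(s)
--     for i in range(n):
--        char = slist.pop(i)
--        for word in t:
--            if "".join(slist)==word:
--                 count+=1
--        slist.insert(i,char)
--     return count
-- ===== SOURCE B (Python) =====
-- def equiliser(s, n, t, m):
--     # Build a counter keyed by each single-deletion string of s, then scan t once.
--     table = {}
--     for i in range(n):
--         d = s[:i] + s[i + 1:]
--         table[d] = table.get(d, 0) + 1
--     count = 0
--     for word in t: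
--         count += table.get(word, 0)
--     return count
-- ===== Notes on version B (the rewrite author's own statement) =====
-- stated objective: faster
-- what changed: Instead of A's nested loop comparing every deletion of s against every word of t, B builds a dict counting each single-deletion string of s once and then makes a single pass over t adding table lookups.
import Mathlib
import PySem

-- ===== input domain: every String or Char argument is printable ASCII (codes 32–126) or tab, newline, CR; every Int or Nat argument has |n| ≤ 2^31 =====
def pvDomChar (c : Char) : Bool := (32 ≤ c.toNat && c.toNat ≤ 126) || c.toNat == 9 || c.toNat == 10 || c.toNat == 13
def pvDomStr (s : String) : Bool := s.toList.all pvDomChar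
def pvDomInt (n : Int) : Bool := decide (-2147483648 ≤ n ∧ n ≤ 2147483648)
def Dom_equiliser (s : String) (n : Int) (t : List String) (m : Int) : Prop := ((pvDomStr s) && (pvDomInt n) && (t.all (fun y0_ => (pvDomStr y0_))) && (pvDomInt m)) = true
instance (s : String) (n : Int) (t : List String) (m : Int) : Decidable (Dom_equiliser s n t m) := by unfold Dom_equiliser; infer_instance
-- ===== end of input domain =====

-- B replaces A's nested position×word equality scan by a dict counting the single-deletion
-- strings of s built once, followed by one lookup pass over t.

-- ===== PORT A =====
-- literal transliteration of A: fold over range(n) carrying (count, slist);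
-- pop(i) / insert(i, char) via PySem; on pop IndexError (outside Pre_) the state is kept.
def equiliser (s : String) (n : Int) (t : List String) (m : Int) : Int :=
  ((PySem.List.pyRange 0 n 1).foldl
    (fun (st : Int × List Char) i =>
      match PySem.List.pop? st.2 i with
      | some (ch, rest) =>
          (t.foldl (fun c word => if String.ofList rest == word then c + 1 else c) st.1,
           PySem.List.insert rest i ch)
      | none => st)
    (0, s.toList)).1

-- ===== PORT B =====
-- literal transliteration of Source B: build table over range(n) with s[:i] + s[i+1:], then one pass over t.
def equiliser_alt (s : String) (n : Int) (t : List String) (m : Int) : Int :=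
  let table := (PySem.List.pyRange 0 n 1).foldl
    (fun (d : PySem.Dict String Int) i =>
      let del := String.ofList (PySem.List.slice s.toList none (some i) ++
                            PySem.List.slice s.toList (some (i + 1)) none)
      d.insert del (d.getD del 0 + 1))
    PySem.Dict.empty
  t.foldl (fun c word => c + table.getD word 0) 0

-- ===== PRECONDITION & SPEC =====
-- A raises IndexError (slist.pop(i)) exactly when n exceeds len(s); Pre_ excludes only those inputs.
def Pre_equiliser (s : String) (n : Int) (t : List String) (m : Int) : Prop :=
  n ≤ (s.length : Int)
instance (s : String) (n : Int) (t : List String) (m : Int) : Decidable (Pre_equiliser s n t m) := by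
  unfold Pre_equiliser; infer_instance

def pvWitness_equiliser : String × Int × List String × Int := ("abc", 3, ["ab", "bc", "xy", "ac"], 0)

def Spec_equiliser (s : String) (n : Int) (t : List String) (m : Int) (out : Int) : Prop := out = equiliser_alt s n t m
instance (s : String) (n : Int) (t : List String) (m : Int) (out : Int) : Decidable (Spec_equiliser s n t m out) := by unfold Spec_equiliser; infer_instance

-- ===== CLAIM (what is proved, stated in full; the proofs are below) =====
def Claim_equal_equiliser : Prop := ∀ (s : String) (n : Int) (t : List String) (m : Int), Dom_equiliser s n t m → Pre_equiliser s n t m → Spec_equiliser s n t m (equiliser s n t m)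

-- ===== LEMMAS AND PROOFS =====

-- inner word loop of A counts occurrences of v in t
theorem pv_foldl_count (t : List String) (v : String) (acc : Int) :
    t.foldl (fun c word => if v == word then c + 1 else c) acc = acc + (t.count v : Int) := by
  induction t generalizing acc with
  | nil => simp
  | cons w t ih =>
      rw [List.foldl_cons, ih]
      by_cases h : v = w
      · subst h
        rw [if_pos (by simp), List.count_cons_self]
        push_cast; ring
      · rw [if_neg (by simpa using h), List.count_cons_of_ne (Ne.symm h)]

-- restoring the popped element: insert (eraseIdx xs k) k xs[k] = xs
theorem pv_insert_eraseIdx (xs : List Char) (k : Nat) (h : k < xs.length) :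
    PySem.List.insert (xs.eraseIdx k) (k : Int) xs[k] = xs := by
  have hlen : (xs.take k).length = k := by simp; omega
  rw [PySem.List.insert_natCast _ _ _ (by rw [List.length_eraseIdx_of_lt h]; omega)]
  rw [List.eraseIdx_eq_take_drop_succ]
  have h1 : (xs.take k ++ xs.drop (k + 1)).take k = xs.take k := by
    rw [List.take_append_of_le_length (by omega), List.take_take, min_self]
  have h2 : (xs.take k ++ xs.drop (k + 1)).drop k = xs.drop (k + 1) := by
    have h3 := List.drop_left (l₁ := xs.take k) (l₂ := xs.drop (k + 1))
    rwa [hlen] at h3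
  rw [h1, h2, List.getElem_cons_drop h, List.take_append_drop]

-- A's range fold computes acc + Σ_i t.count (deletion at i), leaving slist unchanged
theorem pv_A_fold (t : List String) (xs : List Char) (a b acc : Int)
    (ha : 0 ≤ a) (hb : b ≤ (xs.length : Int)) :
    (PySem.List.pyRange a b 1).foldl
      (fun (st : Int × List Char) i =>
        match PySem.List.pop? st.2 i with
        | some (ch, rest) =>
            (t.foldl (fun c word => if String.ofList rest == word then c + 1 else c) st.1,
             PySem.List.insert rest i ch)
        | none => st)
      (acc, xs)
    = (acc + ((PySem.List.pyRange a b 1).map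
        (fun i => (t.count (String.ofList (xs.eraseIdx i.toNat)) : Int))).sum, xs) := by
  by_cases hab : b ≤ a
  · rw [PySem.List.pyRange_one_eq_nil hab]; simp
  · have hab' : a < b := by omega
    rw [PySem.List.pyRange_one_cons hab']
    have hk : a.toNat < xs.length := by omega
    have haa : ((a.toNat : Nat) : Int) = a := by omega
    have hpop : PySem.List.pop? xs a = some (xs[a.toNat], xs.eraseIdx a.toNat) := by
      have h4 := PySem.List.pop?_natCast xs a.toNat hk
      rwa [haa] at h4
    have hins : PySem.List.insert (xs.eraseIdx a.toNat) a xs[a.toNat] = xs := by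
      have h5 := pv_insert_eraseIdx xs a.toNat hk
      rwa [haa] at h5
    rw [List.foldl_cons, List.map_cons, List.sum_cons]
    simp only [hpop]
    rw [pv_foldl_count, hins]
    rw [pv_A_fold t xs (a + 1) b _ (by omega) hb, add_assoc]
termination_by (b - a).toNat
decreasing_by omega

-- double-counting swap: Σ_{d ∈ l1} count of d in l2 = Σ_{w ∈ l2} count of w in l1
theorem pv_count_swap (l1 l2 : List String) :
    (l1.map (fun d => (l2.count d : Int))).sum = (l2.map (fun w => (l1.count w : Int))).sum := by
  induction l1 with
  | nil => simp
  | cons d l1 ih =>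
      have key : ∀ (l : List String),
          (l.map (fun w => (((d :: l1).count w : Nat) : Int))).sum
            = (l.map (fun w => ((l1.count w : Nat) : Int))).sum + (l.count d : Int) := by
        intro l
        induction l with
        | nil => simp
        | cons w l ihl =>
            rw [List.map_cons, List.sum_cons, List.map_cons, List.sum_cons, ihl]
            by_cases h : w = d
            · subst h
              rw [List.count_cons_self, List.count_cons_self]
              push_cast; ring
            · rw [List.count_cons_of_ne (Ne.symm h), List.count_cons_of_ne (by exact h)]
              ring
      rw [List.map_cons, List.sum_cons, ih, key, add_comm]

-- B's accumulation pass sums the table lookups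
theorem pv_B_fold (t : List String) (g : String → Int) (acc : Int) :
    t.foldl (fun c word => c + g word) acc = acc + (t.map g).sum := by
  induction t generalizing acc with
  | nil => simp
  | cons w t ih => simp [ih]; ring

-- ===== VERDICT (by name: the statement is the Claim_ definition above) =====
theorem equiliser_spec : Claim_equal_equiliser := by
  intro s n t m _hdom hpre
  unfold Spec_equiliser equiliser equiliser_alt
  dsimp only
  have hpre' : n ≤ (s.toList.length : Int) := by simpa [Pre_equiliser] using hpre
  rw [pv_A_fold t s.toList 0 n 0 le_rfl hpre']
  have hdel : ∀ i ∈ PySem.List.pyRange 0 n 1,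
      String.ofList (PySem.List.slice s.toList none (some i) ++
                 PySem.List.slice s.toList (some (i + 1)) none)
      = String.ofList (s.toList.eraseIdx i.toNat) := by
    intro i hi
    rw [PySem.List.mem_pyRange_one] at hi
    rw [PySem.List.slice_to _ hi.1, PySem.List.slice_from _ (by omega)]
    have h1 : (i + 1).toNat = i.toNat + 1 := by omega
    rw [h1, List.eraseIdx_eq_take_drop_succ]
  have htable : (PySem.List.pyRange 0 n 1).foldl
      (fun (d : PySem.Dict String Int) i =>
        let del := String.ofList (PySem.List.slice s.toList none (some i) ++
                              PySem.List.slice s.toList (some (i + 1)) none)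
        d.insert del (d.getD del 0 + 1))
      PySem.Dict.empty
      = ((PySem.List.pyRange 0 n 1).map (fun i => String.ofList (s.toList.eraseIdx i.toNat))).foldl
          (fun (d : PySem.Dict String Int) x => d.insert x (d.getD x 0 + 1)) PySem.Dict.empty := by
    rw [List.foldl_map]
    apply PySem.List.foldl_congr_mem
    intro d i hi
    dsimp only
    rw [hdel i hi]
  rw [htable, pv_B_fold]
  simp only [PySem.Dict.getD_foldl_insert_add_one, PySem.Dict.getD_empty, zero_add]
  rw [← pv_count_swap]
  simp [List.map_map, Function.comp_def]
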